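-- pv_equiv track=rewrite | github.com/George-King-123/WXML-Extremal-Groups | messing_with_D_inf.py | compute_Sn
-- ===== SOURCE A (Python) =====
-- def op (elt1, elt2):
--   return (elt1[0] + elt1[1] * elt2[0], elt1[1] * elt2[1])
--
-- def compute_Sn(S, n):
--   if n < 1:
--     raise ValueError("should not give compute_Sn any value < 1")
--   if n == 1:
--     return S
--
--   prod_with_one_less = compute_Sn(S, n - 1)
--   s_n = set()
--   for elt in S:
--     for prod in prod_with_one_less:
--       s_n.add(op(elt, prod))
--
--   return s_n
-- ===== SOURCE B (Python) =====
-- def op (elt1, elt2):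
--   return (elt1[0] + elt1[1] * elt2[0], elt1[1] * elt2[1])
--
-- def compute_Sn(S, n):
--   if n < 1:
--     raise ValueError("should not give compute_Sn any value < 1")
--   result = S
--   for _ in range(n - 1):
--     result = {op(elt, prod) for elt in S for prod in result}
--   return result
-- ===== Notes on version B (the rewrite author's own statement) =====
-- stated objective: simpler
-- what changed: Replaces the n-deep recursion with a single iterative loop that rebuilds the set n-1 times via one set comprehension, removing the recursion (and Python's recursion-depth limit) and the explicit accumulator loops.
import Mathlib
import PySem

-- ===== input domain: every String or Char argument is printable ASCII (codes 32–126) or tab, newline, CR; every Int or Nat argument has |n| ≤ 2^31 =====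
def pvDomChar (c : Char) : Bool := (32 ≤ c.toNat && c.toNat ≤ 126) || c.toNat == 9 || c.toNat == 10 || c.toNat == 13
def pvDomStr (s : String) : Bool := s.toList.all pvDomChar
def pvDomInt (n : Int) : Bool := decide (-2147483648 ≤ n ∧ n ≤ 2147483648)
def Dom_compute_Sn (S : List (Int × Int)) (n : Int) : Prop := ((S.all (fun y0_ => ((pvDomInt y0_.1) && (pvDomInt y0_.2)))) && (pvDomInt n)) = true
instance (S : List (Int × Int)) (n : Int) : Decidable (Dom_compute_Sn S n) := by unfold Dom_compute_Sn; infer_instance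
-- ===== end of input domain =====

-- B replaces A's n-deep recursion by a single iterative loop rebuilding the set with one comprehension per step; equal return values proved (for n == 1 both return S unchanged).


-- ===== PORT A =====
def pvOp (elt1 elt2 : Int × Int) : Int × Int :=
  (elt1.1 + elt1.2 * elt2.1, elt1.2 * elt2.2)

-- A's recursion on n, on the Nat measure (n ≥ 1 is Pre_; 0 is unreachable there)
def computeSnRec (S : List (Int × Int)) : Nat → List (Int × Int)
  | 0 => []
  | 1 => S
  | (k+2) =>
    let prod_with_one_less := computeSnRec S (k+1)
    S.foldl (fun s_n elt =>
      prod_with_one_less.foldl (fun s_n prod => PySem.Set.add s_n (pvOp elt prod)) s_n)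
      PySem.Set.empty

def compute_Sn (S : List (Int × Int)) (n : Int) : List (Int × Int) :=
  if n < 1 then [] else computeSnRec S n.toNat   -- n < 1: A raises ValueError (excluded by Pre_)

-- ===== PORT B =====
-- one loop step: result = {op(elt, prod) for elt in S for prod in result}
def pvStep (S result : List (Int × Int)) : List (Int × Int) :=
  PySem.Set.ofList (S.flatMap (fun elt => result.map (fun prod => pvOp elt prod)))

def compute_Sn_alt (S : List (Int × Int)) (n : Int) : List (Int × Int) :=
  if n < 1 then [] else (List.range (n - 1).toNat).foldl (fun result _ => pvStep S result) S

-- ===== PRECONDITION & SPEC =====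
-- A raises ValueError for n < 1; exactly those inputs are excluded.
def Pre_compute_Sn (S : List (Int × Int)) (n : Int) : Prop := 1 ≤ n
instance (S : List (Int × Int)) (n : Int) : Decidable (Pre_compute_Sn S n) := by unfold Pre_compute_Sn; infer_instance
def pvWitness_compute_Sn : (List (Int × Int)) × Int := ([(1, 2), (0, 1)], 3)

def Spec_compute_Sn (S : List (Int × Int)) (n : Int) (out : List (Int × Int)) : Prop := out = compute_Sn_alt S n
instance (S : List (Int × Int)) (n : Int) (out : List (Int × Int)) : Decidable (Spec_compute_Sn S n out) := by unfold Spec_compute_Sn; infer_instance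

-- ===== CLAIM (what is proved, stated in full; the proofs are below) =====
def Claim_equal_compute_Sn : Prop := ∀ (S : List (Int × Int)) (n : Int), Dom_compute_Sn S n → Pre_compute_Sn S n → Spec_compute_Sn S n (compute_Sn S n)

-- ===== LEMMAS AND PROOFS =====

-- folding Set.add over a flatMap = the nested fold
theorem foldl_add_flatMap {α β : Type} [BEq α] (L : List β) (f : β → List α) (acc : List α) :
    (L.flatMap f).foldl PySem.Set.add acc
      = L.foldl (fun a e => (f e).foldl PySem.Set.add a) acc := by
  induction L generalizing acc with
  | nil => rfl
  | cons x xs ih => simp [List.flatMap_cons, List.foldl_append, ih]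

-- one comprehension step = A's nested add-loops
theorem pvStep_eq (S prev : List (Int × Int)) :
    pvStep S prev
      = S.foldl (fun s_n elt =>
          prev.foldl (fun s_n prod => PySem.Set.add s_n (pvOp elt prod)) s_n)
          PySem.Set.empty := by
  simp [pvStep, PySem.Set.ofList_eq_foldl, foldl_add_flatMap, List.foldl_map]

-- k iterations of the step from S = A's recursion at depth k+1
theorem iterate_eq_rec (S : List (Int × Int)) (k : Nat) :
    (List.range k).foldl (fun result _ => pvStep S result) S = computeSnRec S (k + 1) := by
  induction k with
  | zero => rfl
  | succ k ih =>
    rw [List.range_succ, List.foldl_append, ih]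
    cases k with
    | zero => simp [computeSnRec, pvStep_eq]
    | succ m => simp [List.foldl_cons, List.foldl_nil, pvStep_eq, computeSnRec]

-- ===== VERDICT (by name: the statement is the Claim_ definition above) =====
theorem compute_Sn_spec : Claim_equal_compute_Sn := by
  intro S n _ hpre
  unfold Spec_compute_Sn compute_Sn compute_Sn_alt Pre_compute_Sn at *
  have h1 : ¬ n < 1 := by omega
  simp only [h1, if_false]
  have hn : n.toNat = (n - 1).toNat + 1 := by omega
  rw [hn, iterate_eq_rec]
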